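-- pv_equiv track=rewrite | github.com/vrutberg/advent-of-code | 2017/1-1/lib.py | solve_imperatively
-- ===== SOURCE A (Python) =====
-- def solve_imperatively(input: str):
--     last = input[-1:]
--     result = 0
--
--     for i in input:
--         if i == last:
--             result += int(i)
--
--         last = i
--
--     return result
-- ===== SOURCE B (Python) =====
-- def solve_imperatively(input: str):
--     # Run-length decomposition: each maximal run of an equal character d with
--     # length L contributes (L-1)*int(d); the circular wrap adds int(input[0])
--     # once when the string starts and ends with the same character.
--     result = 0
--     i = 0
--     n = len(input)
--     while i < n:
--         j = i
--         while j < n and input[j] == input[i]: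
--             j += 1
--         if j - i > 1:
--             result += (j - i - 1) * int(input[i])
--         i = j
--     if input and input[0] == input[-1]:
--         result += int(input[0])
--     return result
-- ===== Notes on version B (the rewrite author's own statement) =====
-- stated objective: alternative
-- what changed: Replaces the running-previous single scan with a run-length decomposition: each maximal run of equal characters of length L contributes (L-1)*digit, plus one wrap term when the first and last characters agree.
import Mathlib
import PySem

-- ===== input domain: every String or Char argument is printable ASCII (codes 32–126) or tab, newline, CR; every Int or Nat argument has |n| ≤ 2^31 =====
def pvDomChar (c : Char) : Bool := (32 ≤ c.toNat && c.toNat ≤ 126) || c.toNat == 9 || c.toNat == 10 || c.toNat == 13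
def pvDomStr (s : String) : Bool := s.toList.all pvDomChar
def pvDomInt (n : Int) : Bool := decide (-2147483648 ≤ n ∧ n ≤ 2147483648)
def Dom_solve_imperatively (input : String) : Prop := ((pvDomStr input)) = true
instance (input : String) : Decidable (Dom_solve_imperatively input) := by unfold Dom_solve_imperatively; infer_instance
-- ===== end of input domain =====

-- B replaces A's running-previous scan by a run-length (maximal-run) decomposition plus one
-- circular wrap term; same O(n) cost, different structure. Equivalence is claimed on Pre_ (below).

-- int(i) for a single character i; Python raises ValueError on a non-digit, which Pre_ excludes,
-- so the .getD 0 default is never reached on admitted inputs.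
def pvCharVal (c : Char) : Int := (PySem.Int.ofStr? (String.ofList [c])).getD 0

-- ===== PORT A =====
-- state: (last, result); last = input[-1:] initially (none for the empty slice "")
def solve_imperatively (input : String) : Int :=
  let cs := input.toList
  (cs.foldl (fun (st : Option Char × Int) i =>
      (some i, if some i = st.1 then st.2 + pvCharVal i else st.2))
    (cs.getLast?, 0)).2

-- ===== PORT B =====
-- inner while loop of Source B: length of the maximal prefix of cs equal to c (run continuation)
def pvRuns : List Char → List (Char × Nat)
  | [] => []
  | c :: cs =>
    (c, (cs.takeWhile (fun x => x = c)).length + 1) :: pvRuns (cs.dropWhile (fun x => x = c))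
termination_by l => l.length
decreasing_by
  exact Nat.lt_succ_of_le (List.Sublist.length_le (List.dropWhile_sublist _))

def solve_imperatively_alt (input : String) : Int :=
  let cs := input.toList
  let base := (pvRuns cs).foldl
    (fun acc (p : Char × Nat) => if p.2 > 1 then acc + ((p.2 : Int) - 1) * pvCharVal p.1 else acc) 0
  match cs with
  | [] => base
  | c :: _ => if cs.getLast? = some c then base + pvCharVal c else base

-- ===== PRECONDITION & SPEC =====
-- Pre_ excludes exactly the inputs on which Python A raises ValueError: those where some
-- character equal to its circular predecessor is not a decimal digit (int(i) is only called there).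
def pvPreCheck (cs : List Char) : Bool :=
  ((cs.zip (cs.drop 1)).all fun p => !(p.1 == p.2) || p.2.isDigit) &&
  (match cs.head?, cs.getLast? with
   | some c, some l => !(c == l) || c.isDigit
   | _, _ => true)

def Pre_solve_imperatively (input : String) : Prop := pvPreCheck input.toList = true
instance (input : String) : Decidable (Pre_solve_imperatively input) := by
  unfold Pre_solve_imperatively; infer_instance

def pvWitness_solve_imperatively : String := "112"

def Spec_solve_imperatively (input : String) (out : Int) : Prop := out = solve_imperatively_alt input
instance (input : String) (out : Int) : Decidable (Spec_solve_imperatively input out) := by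
  unfold Spec_solve_imperatively; infer_instance

-- ===== CLAIM (what is proved, stated in full; the proofs are below) =====
def Claim_equal_solve_imperatively : Prop := ∀ (input : String), Dom_solve_imperatively input → Pre_solve_imperatively input → Spec_solve_imperatively input (solve_imperatively input)

-- ===== LEMMAS AND PROOFS =====

-- sum over the tail: each element equal to its predecessor contributes its value
def pvAdjSum (p : Char) : List Char → Int
  | [] => 0
  | x :: xs => (if x = p then pvCharVal x else 0) + pvAdjSum x xs

-- internal adjacent-equal sum of a whole list
def pvAdjHead : List Char → Int
  | [] => 0
  | x :: xs => pvAdjSum x xs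

lemma pvFoldA (l : List Char) : ∀ (p : Option Char) (r : Int),
    (l.foldl (fun (st : Option Char × Int) i =>
        (some i, if some i = st.1 then st.2 + pvCharVal i else st.2)) (p, r)).2
      = r + (match p, l with
             | _, [] => 0
             | none, x :: xs => pvAdjSum x xs
             | some q, x :: xs => (if x = q then pvCharVal x else 0) + pvAdjSum x xs) := by
  induction l with
  | nil => intro p r; cases p <;> simp
  | cons x xs ih =>
    intro p r
    cases p with
    | none =>
      simp only [List.foldl_cons, ih]
      cases xs <;> simp [pvAdjSum]
    | some q =>
      simp only [List.foldl_cons, ih]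
      cases xs <;> by_cases h : x = q <;> simp [pvAdjSum, h, Option.some.injEq] <;> ring_nf

lemma pvAdjSum_span (c : Char) (cs : List Char) :
    pvAdjSum c cs
      = ((cs.takeWhile (fun x => x = c)).length : Int) * pvCharVal c
        + pvAdjHead (cs.dropWhile (fun x => x = c)) := by
  induction cs with
  | nil => simp [pvAdjSum, pvAdjHead]
  | cons x xs ih =>
    by_cases h : x = c
    · subst h
      simp only [List.takeWhile, List.dropWhile, decide_eq_true_eq, if_pos rfl, decide_true]
      simp [pvAdjSum, ih]
      ring
    · simp [List.takeWhile, List.dropWhile, h, pvAdjSum, pvAdjHead]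

-- foldl over runs as a recursive sum
def pvRunsSum : List (Char × Nat) → Int
  | [] => 0
  | p :: ps => (if p.2 > 1 then ((p.2 : Int) - 1) * pvCharVal p.1 else 0) + pvRunsSum ps

lemma pvRunsFold (l : List (Char × Nat)) : ∀ (a : Int),
    l.foldl (fun acc p => if p.2 > 1 then acc + ((p.2 : Int) - 1) * pvCharVal p.1 else acc) a
      = a + pvRunsSum l := by
  induction l with
  | nil => intro a; simp [pvRunsSum]
  | cons p ps ih =>
    intro a
    by_cases h : p.2 > 1 <;> simp [pvRunsSum, ih, h] <;> ring_nf

lemma pvRunsSum_eq (cs : List Char) : pvRunsSum (pvRuns cs) = pvAdjHead cs := by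
  induction cs using pvRuns.induct with
  | case1 => simp [pvRuns, pvRunsSum, pvAdjHead]
  | case2 c cs ih =>
    simp only [pvRuns, pvRunsSum, pvAdjHead, pvAdjSum_span c cs, ih]
    by_cases h : (cs.takeWhile (fun x => x = c)).length = 0
    · simp [h]
    · have : (cs.takeWhile (fun x => x = c)).length + 1 > 1 := by omega
      simp [this]

theorem pv_main (input : String) :
    solve_imperatively input = solve_imperatively_alt input := by
  unfold solve_imperatively solve_imperatively_alt
  cases hcs : input.toList with
  | nil => simp [pvRuns]
  | cons c rest =>
    simp only [pvFoldA, pvRunsFold, pvRunsSum_eq, pvAdjHead, zero_add]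
    cases hl : (c :: rest).getLast? with
    | none => simp at hl
    | some l =>
      by_cases h : c = l
      · simp [h, Option.some.injEq]; ring
      · simp [h, Option.some.injEq, Ne.symm h]

-- ===== VERDICT (by name: the statement is the Claim_ definition above) =====
theorem solve_imperatively_spec : Claim_equal_solve_imperatively := by
  intro input _ _
  unfold Spec_solve_imperatively
  exact pv_main input
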